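-- pv_equiv track=rewrite | github.com/yeonnseok/ps-algorithm | 2019 baekjoon/BruteForce/1476_dateCal.py | solve
-- ===== SOURCE A (Python) =====
-- def solve(src):
--     E, S, M = src[0], src[1], src[2]
--     yr = 1
--     while 1:
--         if ((yr-E) % 15 == 0) and ((yr-S) % 28 == 0) and ((yr-M) % 19 == 0):
--             break
--         yr += 1
--     return yr
-- ===== SOURCE B (Python) =====
-- def solve(src):
--     E, S, M = src[0], src[1], src[2]
--     # Constructive CRT for moduli 15, 28, 19 (N = 7980):
--     # 6916 = 532*13 (532 = N/15, 13 = 532^-1 mod 15), 4845 = 285*17, 4200 = 420*10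
--     x = 6916 * E + 4845 * S + 4200 * M
--     return (x - 1) % 7980 + 1
-- ===== Notes on version B (the rewrite author's own statement) =====
-- stated objective: simpler
-- what changed: Replaces A's year-by-year scan for the first year matching all three era cycles with a closed-form constructive CRT combination (x = 6916E + 4845S + 4200M, normalized by (x-1) % 7980 + 1), eliminating the search loop entirely.
import Mathlib
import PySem

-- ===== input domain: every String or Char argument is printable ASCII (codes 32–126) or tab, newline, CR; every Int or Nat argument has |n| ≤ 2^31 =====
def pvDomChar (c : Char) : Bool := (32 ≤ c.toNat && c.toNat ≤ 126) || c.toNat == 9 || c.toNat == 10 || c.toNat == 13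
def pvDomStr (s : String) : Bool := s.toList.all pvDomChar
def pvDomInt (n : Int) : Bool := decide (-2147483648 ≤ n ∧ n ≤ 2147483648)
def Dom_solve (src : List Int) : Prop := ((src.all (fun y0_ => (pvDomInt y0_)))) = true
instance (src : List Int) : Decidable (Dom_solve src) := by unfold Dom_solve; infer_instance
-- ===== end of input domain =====

-- B replaces A's year-by-year scan with the closed-form constructive CRT combination
-- of the three congruences (objective: simpler — a loop-free arithmetic formula).

-- ===== PORT A =====
-- A's `while 1` loop; it always terminates within 7980 steps (the CRT period of 15,28,19),
-- so a fuel of 7980 is a pure totality guard, never reached before the break fires.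
def solveLoop (E S M : Int) (yr : Int) : Nat → Int
  | 0 => yr
  | fuel + 1 =>
    if PySem.Int.mod (yr - E) 15 = 0 ∧ PySem.Int.mod (yr - S) 28 = 0 ∧ PySem.Int.mod (yr - M) 19 = 0 then
      yr
    else
      solveLoop E S M (yr + 1) fuel

def solve (src : List Int) : Int :=
  match PySem.List.pyGet? src 0, PySem.List.pyGet? src 1, PySem.List.pyGet? src 2 with
  | some E, some S, some M => solveLoop E S M 1 7980
  | _, _, _ => 0   -- unreachable under Pre_solve (Python raises IndexError)

-- ===== PORT B =====
def solve_alt (src : List Int) : Int :=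
  match PySem.List.pyGet? src 0 with
  | none => 0   -- unreachable under Pre_solve (Python raises IndexError)
  | some E =>
    match PySem.List.pyGet? src 1 with
    | none => 0
    | some S =>
      match PySem.List.pyGet? src 2 with
      | none => 0
      | some M =>
        let x := 6916 * E + 4845 * S + 4200 * M
        PySem.Int.mod (x - 1) 7980 + 1

-- ===== PRECONDITION & SPEC =====
-- Pre_: Python A indexes src[0], src[1], src[2] and raises IndexError on shorter lists.
def Pre_solve (src : List Int) : Prop := 3 ≤ src.length
instance (src : List Int) : Decidable (Pre_solve src) := by unfold Pre_solve; infer_instance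
def pvWitness_solve : List Int := [1, 2, 3]

def Spec_solve (src : List Int) (out : Int) : Prop := out = solve_alt src
instance (src : List Int) (out : Int) : Decidable (Spec_solve src out) := by unfold Spec_solve; infer_instance

-- ===== CLAIM (what is proved, stated in full; the proofs are below) =====
def Claim_equal_solve : Prop := ∀ (src : List Int), Dom_solve src → Pre_solve src → Spec_solve src (solve src)

-- ===== LEMMAS AND PROOFS =====

-- The loop condition, written with Int.emod (= PySem.Int.mod for positive moduli).
def pvCond (E S M z : Int) : Prop := (z - E) % 15 = 0 ∧ (z - S) % 28 = 0 ∧ (z - M) % 19 = 0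

lemma cond_iff (E S M z : Int) :
    (PySem.Int.mod (z - E) 15 = 0 ∧ PySem.Int.mod (z - S) 28 = 0 ∧ PySem.Int.mod (z - M) 19 = 0)
      ↔ pvCond E S M z := by
  unfold pvCond
  rw [PySem.Int.mod_eq_emod_of_pos (by norm_num : (0:Int) < 15),
      PySem.Int.mod_eq_emod_of_pos (by norm_num : (0:Int) < 28),
      PySem.Int.mod_eq_emod_of_pos (by norm_num : (0:Int) < 19)]

-- If the loop starts at yr ≤ y, has enough fuel to reach y, y satisfies the condition and
-- nothing in [yr, y) does, then the loop returns y.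
lemma loop_finds (E S M : Int) (y : Int) (hy : pvCond E S M y)
    (hmin : ∀ z, 1 ≤ z → pvCond E S M z → z < y → False) :
    ∀ (fuel : Nat) (yr : Int), 1 ≤ yr → yr ≤ y → y ≤ yr + fuel → solveLoop E S M yr fuel = y := by
  intro fuel
  induction fuel with
  | zero => intro yr h0 h1 h2; simp [solveLoop]; omega
  | succ n ih =>
    intro yr h0 h1 h2
    simp only [solveLoop]
    split_ifs with h
    · rcases lt_or_eq_of_le h1 with hlt | heq
      · exact absurd ((cond_iff E S M yr).mp h) (fun hc => hmin yr h0 hc hlt)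
      · exact heq
    · have hne : yr ≠ y := fun he => h (he ▸ (cond_iff E S M y).mpr hy)
      exact ih (yr + 1) (by omega) (by omega) (by push_cast at h2 ⊢; omega)

-- The CRT closed form: y = (x-1) % 7980 + 1 with x = 6916E + 4845S + 4200M
-- is the least positive solution of the three congruences.
lemma crt_value (E S M : Int) :
    solveLoop E S M 1 7980 = (6916 * E + 4845 * S + 4200 * M - 1) % 7980 + 1 := by
  set x : Int := 6916 * E + 4845 * S + 4200 * M with hx
  set y : Int := (x - 1) % 7980 + 1 with hy
  have hb : 1 ≤ y ∧ y ≤ 7980 := by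
    have h1 := Int.emod_nonneg (x - 1) (by norm_num : (7980:Int) ≠ 0)
    have h2 := Int.emod_lt_of_pos (x - 1) (by norm_num : (0:Int) < 7980)
    omega
  have hc : pvCond E S M y := by unfold pvCond; omega
  have hmin : ∀ z, 1 ≤ z → pvCond E S M z → z < y → False := by
    intro z h0 hz hlt
    -- z ≡ y modulo 15, 28 and 19, hence modulo 7980; but 1 ≤ z < y ≤ 7980 forbids that.
    rcases hz with ⟨hz1, hz2, hz3⟩
    obtain ⟨hc1, hc2, hc3⟩ := hc
    omega
  exact loop_finds E S M y hc hmin 7980 1 le_rfl hb.1 (by omega)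

theorem solve_eq_alt (src : List Int) (h : Pre_solve src) : solve src = solve_alt src := by
  match src, h with
  | a :: b :: c :: t, _ =>
    have h0 : PySem.List.pyGet? (a :: b :: c :: t) 0 = some a := by
      simp [PySem.List.pyGet?, PySem.List.pyIdx?]
      rw [if_pos (by omega)]
      simp
    have h1 : PySem.List.pyGet? (a :: b :: c :: t) 1 = some b := by
      simp [PySem.List.pyGet?, PySem.List.pyIdx?]
      rw [if_pos (by omega)]
      simp
    have h2 : PySem.List.pyGet? (a :: b :: c :: t) 2 = some c := by
      simp [PySem.List.pyGet?, PySem.List.pyIdx?]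
      rw [if_pos (by omega)]
      simp
    simp only [solve, solve_alt, h0, h1, h2]
    rw [crt_value, PySem.Int.mod_eq_emod_of_pos (by norm_num : (0:Int) < 7980)]

-- ===== VERDICT (by name: the statement is the Claim_ definition above) =====
theorem solve_spec : Claim_equal_solve := by
  intro src _ hpre
  unfold Spec_solve
  exact solve_eq_alt src hpre
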